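-- pv_equiv track=rewrite | github.com/alexey-zakharenkov/gb-python-algo | les_4/les_4_task_1.py | find_most_frequent_number2
-- ===== SOURCE A (Python) =====
-- def find_most_frequent_number2(arr):
--     """Поддержание массива пар (число, частота)
--     в отсортированном по частоте порядке. В конце алгоритма
--     самое частое число будет в начале такого массива.
--     """
--
--     num_freq = []  # список пар (число, частота)
--
--     for el in arr:
--         for i, (num, freq) in enumerate(num_freq):
--             if el == num:
--                 num_freq[i] = (num, freq + 1)
--                 # Увеличили частоту на 1 и опускаем элемент,
--                 # чтобы элементы были упорядочены в обратном порядке по частоте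
--                 while i > 0 and num_freq[i][1] > num_freq[i - 1][1]:
--                     num_freq[i], num_freq[i - 1] = num_freq[i - 1], num_freq[i]
--                     i -= 1
--                 break
--         else:
--             num_freq.append((el, 1))
--
--     return num_freq[0]
-- ===== SOURCE B (Python) =====
-- def find_most_frequent_number2(arr):
--     """One pass with a counts dict; the running best is replaced only on a
--     strictly larger count, so on ties the number that reached the top count
--     first (earliest M-th occurrence) wins, exactly as in the original."""
--     counts = {}
--     best = arr[0], 0
--     for el in arr:
--         c = counts.get(el, 0) + 1
--         counts[el] = c
--         if c > best[1]:
--             best = el, c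
--     return best
-- ===== Notes on version B (the rewrite author's own statement) =====
-- stated objective: faster
-- what changed: Replaces the list of (number, frequency) pairs kept sorted by repeated linear scan and bubble-up with a single pass over the array using a hash-map of counts and a running best updated only on a strictly larger count (which reproduces A's tie-breaking: the number whose top count is reached first wins).
import Mathlib
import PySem

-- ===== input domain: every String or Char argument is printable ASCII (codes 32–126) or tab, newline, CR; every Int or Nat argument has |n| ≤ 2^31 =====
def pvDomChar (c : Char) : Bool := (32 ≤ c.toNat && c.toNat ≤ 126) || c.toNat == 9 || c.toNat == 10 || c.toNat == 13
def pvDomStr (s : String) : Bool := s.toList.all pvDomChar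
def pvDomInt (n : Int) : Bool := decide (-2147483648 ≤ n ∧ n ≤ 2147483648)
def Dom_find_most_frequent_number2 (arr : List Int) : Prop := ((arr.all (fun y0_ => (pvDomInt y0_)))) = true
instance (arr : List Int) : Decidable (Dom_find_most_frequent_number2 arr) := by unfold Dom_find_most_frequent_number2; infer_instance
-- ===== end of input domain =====

-- B replaces A's sorted pair list (linear scan + bubble-up per element) with one
-- pass over a counts dict and a running best (replaced only on a strictly larger
-- count); equivalence is about the return value on non-empty input.

-- ===== PORT A =====
-- one step of A's outer loop: scan num_freq for el; if found, bump its
-- frequency and bubble it up while strictly greater than its predecessor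
-- (expressed as structural recursion: the recursive result's head is the
-- candidate that may still swap past the current pair); else append (el, 1).
def pvStepA : List (Int × Int) → Int → List (Int × Int)
  | [], el => [(el, 1)]
  | (num, freq) :: rest, el =>
    if el = num then (num, freq + 1) :: rest
    else
      match pvStepA rest el with
      | [] => []          -- unreachable: pvStepA never returns []
      | q :: rest' => if q.2 > freq then q :: (num, freq) :: rest' else (num, freq) :: q :: rest'

def find_most_frequent_number2 (arr : List Int) : Int × Int :=
  match arr.foldl pvStepA [] with
  | [] => (0, 0)          -- Python raises IndexError here (only for arr = []); excluded by Pre_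
  | p :: _ => p

-- ===== PORT B =====
-- one step of B's loop: c = counts.get(el, 0) + 1; counts[el] = c; update best on strictly larger c
def pvStepB (st : PySem.Dict Int Int × (Int × Int)) (el : Int) : PySem.Dict Int Int × (Int × Int) :=
  let c := st.1.getD el 0 + 1
  (st.1.insert el c, if c > st.2.2 then (el, c) else st.2)

def find_most_frequent_number2_alt (arr : List Int) : Int × Int :=
  match arr with
  | [] => (0, 0)          -- Python raises IndexError at arr[0]; excluded by Pre_
  | a0 :: _ => (arr.foldl pvStepB (PySem.Dict.empty, (a0, 0))).2

-- ===== PRECONDITION & SPEC =====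
-- A (num_freq[0]) and B (arr[0]) both raise IndexError on the empty list; Pre_ excludes exactly it.
def Pre_find_most_frequent_number2 (arr : List Int) : Prop := arr ≠ []
instance (arr : List Int) : Decidable (Pre_find_most_frequent_number2 arr) := by
  unfold Pre_find_most_frequent_number2; infer_instance

def pvWitness_find_most_frequent_number2 : List Int := [1, 2, 2]

def Spec_find_most_frequent_number2 (arr : List Int) (out : Int × Int) : Prop := out = find_most_frequent_number2_alt arr
instance (arr : List Int) (out : Int × Int) : Decidable (Spec_find_most_frequent_number2 arr out) := by unfold Spec_find_most_frequent_number2; infer_instance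

-- ===== CLAIM (what is proved, stated in full; the proofs are below) =====
def Claim_equal_find_most_frequent_number2 : Prop := ∀ (arr : List Int), Dom_find_most_frequent_number2 arr → Pre_find_most_frequent_number2 arr → Spec_find_most_frequent_number2 arr (find_most_frequent_number2 arr)

-- ===== LEMMAS AND PROOFS =====

-- frequency recorded for x in A's pair list (0 if absent)
def pvLook : List (Int × Int) → Int → Int
  | [], _ => 0
  | p :: r, x => if p.1 = x then p.2 else pvLook r x

-- invariant of A's pair list: sorted by nonincreasing frequency, distinct numbers, frequencies ≥ 1
def pvInvA (nf : List (Int × Int)) : Prop :=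
  nf.Pairwise (fun p q => q.2 ≤ p.2) ∧ (nf.map Prod.fst).Nodup ∧ ∀ p ∈ nf, 1 ≤ p.2

-- joint relation between A's state and B's state
def pvRel (nf : List (Int × Int)) (st : PySem.Dict Int Int × (Int × Int)) : Prop :=
  pvInvA nf ∧ nf ≠ [] ∧ nf.headD (0, 0) = st.2 ∧ ∀ x, pvLook nf x = st.1.getD x 0

lemma pvLook_append (A B : List (Int × Int)) (x : Int) :
    pvLook (A ++ B) x = if x ∈ A.map Prod.fst then pvLook A x else pvLook B x := by
  induction A with
  | nil => simp
  | cons p A ih =>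
    by_cases h : p.1 = x
    · simp [pvLook, h]
    · have h' : ¬ x = p.1 := fun e => h e.symm
      have hc : (x ∈ p.1 :: List.map Prod.fst A) ↔ (x ∈ List.map Prod.fst A) := by simp [h']
      rw [List.cons_append,
        show pvLook (p :: (A ++ B)) x = if p.1 = x then p.2 else pvLook (A ++ B) x from rfl,
        if_neg h, ih,
        show pvLook (p :: A) x = if p.1 = x then p.2 else pvLook A x from rfl,
        if_neg h, List.map_cons, if_congr hc rfl rfl]

lemma pvLook_zero (nf : List (Int × Int)) (x : Int) (h : x ∉ nf.map Prod.fst) :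
    pvLook nf x = 0 := by
  induction nf with
  | nil => rfl
  | cons p rest ih =>
    simp only [List.map_cons, List.mem_cons, not_or] at h
    have hp : ¬ p.1 = x := fun e => h.1 e.symm
    simp [pvLook, hp, ih h.2]

-- A's step when el is absent: append (el, 1) (uses freq ≥ 1 and sortedness)
lemma pvStepA_not_mem (nf : List (Int × Int)) (el : Int)
    (hs : nf.Pairwise (fun p q => q.2 ≤ p.2)) (h1 : ∀ p ∈ nf, 1 ≤ p.2)
    (h : el ∉ nf.map Prod.fst) :
    pvStepA nf el = nf ++ [(el, 1)] := by
  induction nf with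
  | nil => simp [pvStepA]
  | cons p rest ih =>
    obtain ⟨num, freq⟩ := p
    have hne : el ≠ num := by simp at h; tauto
    have hrec := ih (List.Pairwise.of_cons hs) (fun q hq => h1 q (List.mem_cons_of_mem _ hq))
      (by simp at h ⊢; tauto)
    cases rest with
    | nil =>
      have hfreq : 1 ≤ freq := h1 (num, freq) (by simp)
      have h01 : ¬ ((1 : Int) > freq) := by omega
      simp only [List.nil_append] at hrec
      conv_lhs => rw [pvStepA]
      rw [if_neg hne, hrec]
      simp [h01]
    | cons r rs =>
      have hr : r.2 ≤ freq := by
        rcases List.pairwise_cons.mp hs with ⟨hall, _⟩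
        exact hall r (by simp)
      have h01 : ¬ (r.2 > freq) := by omega
      simp only [List.cons_append] at hrec
      conv_lhs => rw [pvStepA]
      rw [if_neg hne, hrec]
      simp [h01]

-- A's step when el is present with frequency f: bump to f+1 and bubble up
-- past strictly smaller frequencies = insert after the prefix with freq ≥ f+1
lemma pvStepA_mem (pre suf : List (Int × Int)) (el : Int) (f : Int)
    (hs : (pre ++ (el, f) :: suf).Pairwise (fun p q => q.2 ≤ p.2))
    (hel : el ∉ pre.map Prod.fst) :
    pvStepA (pre ++ (el, f) :: suf) el =
      pre.takeWhile (fun q => f < q.2) ++ (el, f + 1) ::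
        (pre.dropWhile (fun q => f < q.2) ++ suf) := by
  induction pre with
  | nil => simp [pvStepA]
  | cons p pre' ih =>
    obtain ⟨num, fr⟩ := p
    have hne : el ≠ num := by simp at hel; tauto
    have hrec := ih (List.Pairwise.of_cons hs) (by simp at hel ⊢; tauto)
    cases htw : pre'.takeWhile (fun q => decide (f < q.2)) with
    | cons t0 tw' =>
      have ht0 : f < t0.2 := by
        have := List.mem_takeWhile_imp (l := pre') (p := fun q => decide (f < q.2))
          (x := t0) (by rw [htw]; simp)
        simpa using this
      have ht0pre : t0 ∈ pre' := (List.takeWhile_sublist _).subset (by rw [htw]; simp)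
      have hfr : t0.2 ≤ fr := by
        rcases List.pairwise_cons.mp hs with ⟨hall, _⟩
        exact hall t0 (by simp [ht0pre])
      have hswap : ¬ (t0.2 > fr) := by omega
      have hpred : f < fr := lt_of_lt_of_le ht0 hfr
      rw [htw] at hrec
      simp only [List.cons_append] at hrec
      rw [List.cons_append]
      conv_lhs => rw [pvStepA]
      rw [if_neg hne, hrec]
      simp [hswap, hpred, htw]
    | nil =>
      have hdw : pre'.dropWhile (fun q => decide (f < q.2)) = pre' := by
        have := List.takeWhile_append_dropWhile (p := fun q => decide (f < q.2)) (l := pre')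
        rw [htw] at this; simpa using this
      rw [htw] at hrec
      simp only [List.nil_append] at hrec
      by_cases hpred : f < fr
      · have hswap : ¬ (f + 1 > fr) := by omega
        rw [List.cons_append]
        conv_lhs => rw [pvStepA]
        rw [if_neg hne, hrec]
        simp [hswap, hpred, htw, hdw]
      · have hswap : (f + 1 > fr) := by omega
        rw [List.cons_append]
        conv_lhs => rw [pvStepA]
        rw [if_neg hne, hrec]
        simp [hswap, hpred, hdw]

lemma pvExists_split (nf : List (Int × Int)) (el : Int) (h : el ∈ nf.map Prod.fst) :
    ∃ pre f suf, nf = pre ++ (el, f) :: suf ∧ el ∉ pre.map Prod.fst ∧ pvLook nf el = f := by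
  induction nf with
  | nil => simp at h
  | cons p rest ih =>
    by_cases hp : p.1 = el
    · exact ⟨[], p.2, rest, by simp [← hp], by simp, by simp [pvLook, hp]⟩
    · rw [List.map_cons, List.mem_cons] at h
      have hmem : el ∈ rest.map Prod.fst := h.resolve_left (fun e => hp e.symm)
      obtain ⟨pre, f, suf, h1, h2, h3⟩ := ih hmem
      refine ⟨p :: pre, f, suf, by simp [h1], ?_, by simp [pvLook, hp, h3]⟩
      simp [h2]; exact fun e => hp e.symm

-- after dropping the prefix with frequency ≥ f+1 from a nonincreasing list, everything is ≤ f
lemma pvDropWhile_le (f : Int) (l : List (Int × Int))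
    (hps : l.Pairwise (fun p q => q.2 ≤ p.2)) :
    ∀ b ∈ l.dropWhile (fun q => f < q.2), b.2 ≤ f := by
  induction l with
  | nil => simp
  | cons a l' ih =>
    by_cases ha : f < a.2
    · intro b hb
      rw [List.dropWhile_cons_of_pos (by simpa using ha)] at hb
      exact ih (List.Pairwise.of_cons hps) b hb
    · intro b hb
      rw [List.dropWhile_cons_of_neg (by simpa using ha)] at hb
      rcases List.mem_cons.mp hb with rfl | hb
      · omega
      · have : b.2 ≤ a.2 := (List.pairwise_cons.mp hps).1 b hb
        omega

lemma pvRel_step (nf : List (Int × Int)) (st : PySem.Dict Int Int × (Int × Int)) (el : Int)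
    (h : pvRel nf st) : pvRel (pvStepA nf el) (pvStepB st el) := by
  obtain ⟨⟨hs, hnd, h1⟩, hne, hhd, hlk⟩ := h
  by_cases hmem : el ∈ nf.map Prod.fst
  · -- el already counted: split nf = pre ++ (el, f) :: suf
    obtain ⟨pre, f, suf, hsplit, hpre, hlf⟩ := pvExists_split nf el hmem
    have hc : st.1.getD el 0 + 1 = f + 1 := by rw [← hlk el, hlf]
    subst hsplit
    have hstep := pvStepA_mem pre suf el f hs hpre
    set tw := pre.takeWhile (fun q => decide (f < q.2)) with htw
    set dw := pre.dropWhile (fun q => decide (f < q.2)) with hdwdef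
    have hpredecomp : tw ++ dw = pre := List.takeWhile_append_dropWhile
    rcases List.pairwise_append.mp hs with ⟨hps, hcs, hcross⟩
    rcases List.pairwise_cons.mp hcs with ⟨hfsuf, hsufp⟩
    have hf1 : 1 ≤ f := h1 (el, f) (by simp)
    have htw_mem : ∀ a ∈ tw, f < a.2 := fun a ha => by
      have := List.mem_takeWhile_imp (htw ▸ ha); simpa using this
    have htw_pre : ∀ a ∈ tw, a ∈ pre := fun a ha =>
      (List.takeWhile_sublist _).subset (htw ▸ ha)
    have hdw_pre : ∀ a ∈ dw, a ∈ pre := fun a ha =>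
      (List.dropWhile_sublist _).subset (hdwdef ▸ ha)
    have hdw_le : ∀ b ∈ dw, b.2 ≤ f := fun b hb => pvDropWhile_le f pre hps b (hdwdef ▸ hb)
    have hsuf_le : ∀ b ∈ suf, b.2 ≤ f := fun b hb => hfsuf b hb
    rw [hstep]
    refine ⟨⟨?_, ?_, ?_⟩, ?_, ?_, ?_⟩
    · -- sorted
      rw [List.pairwise_append]
      refine ⟨hps.sublist (List.takeWhile_sublist _), ?_, ?_⟩
      · rw [List.pairwise_cons]
        refine ⟨?_, ?_⟩
        · intro b hb
          rcases List.mem_append.mp hb with hb | hb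
          · have := hdw_le b hb; simpa using by omega
          · have := hsuf_le b hb; simpa using by omega
        · rw [List.pairwise_append]
          exact ⟨hps.sublist (List.dropWhile_sublist _), hsufp,
            fun a ha b hb => hcross a (hdw_pre a ha) b (List.mem_cons_of_mem _ hb)⟩
      · intro a ha b hb
        have haf := htw_mem a ha
        rcases List.mem_cons.mp hb with rfl | hb
        · simpa using haf
        · rcases List.mem_append.mp hb with hb | hb
          · have := hdw_le b hb; simp; omega
          · have := hsuf_le b hb; simp; omega
    · -- nodup keys: result keys are a permutation of the original keys
      have hnd' : (((tw ++ dw) ++ (el, f) :: suf).map Prod.fst).Nodup := by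
        rw [hpredecomp]; exact hnd
      refine List.Perm.nodup ?_ hnd'
      simp only [List.map_append, List.map_cons, List.append_assoc]
      exact List.Perm.append_left _ List.perm_middle
    · -- freqs ≥ 1
      intro p hp
      rcases List.mem_append.mp hp with hp | hp
      · exact h1 p (List.mem_append.mpr (Or.inl (htw_pre p hp)))
      · rcases List.mem_cons.mp hp with rfl | hp
        · simp; omega
        · rcases List.mem_append.mp hp with hp | hp
          · exact h1 p (List.mem_append.mpr (Or.inl (hdw_pre p hp)))
          · exact h1 p (by simp [hp])
    · -- nonempty
      cases tw <;> simp
    · -- head = new best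
      show _ = (pvStepB st el).2
      have hstB : (pvStepB st el).2 = if f + 1 > st.2.2 then (el, f + 1) else st.2 := by
        simp only [pvStepB, hc]
      rw [hstB]
      cases pre with
      | nil =>
        have htwnil : tw = [] := by simp [htw]
        have hb2 : st.2 = (el, f) := by simpa using hhd.symm
        have hcond : f + 1 > st.2.2 := by rw [hb2]; exact lt_add_one f
        rw [if_pos hcond, htwnil]
        simp
      | cons p0 pre'' =>
        have hb : st.2 = p0 := by simpa using hhd.symm
        by_cases hp0 : f < p0.2
        · have htwc : tw = p0 :: pre''.takeWhile (fun q => decide (f < q.2)) := by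
            simp [htw, hp0]
          have hcond : ¬ (f + 1 > st.2.2) := by rw [hb]; omega
          rw [if_neg hcond, htwc]
          simpa using hb.symm
        · have htwnil : tw = [] := by simp [htw, hp0]
          have hcond : f + 1 > st.2.2 := by rw [hb]; omega
          rw [if_pos hcond, htwnil]
          simp
    · -- lookups agree with the dict after insert
      intro x
      show _ = ((st.1.insert el (st.1.getD el 0 + 1)).getD x 0)
      rw [PySem.Dict.getD_insert, hc]
      have hkeys : x ∈ pre.map Prod.fst ↔ x ∈ tw.map Prod.fst ∨ x ∈ dw.map Prod.fst := by
        rw [← hpredecomp]; simp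
      by_cases hx : x = el
      · subst hx
        have hxtw : x ∉ tw.map Prod.fst := fun hc' => hpre (by
          rcases List.mem_map.mp hc' with ⟨a, ha, rfl⟩
          exact List.mem_map.mpr ⟨a, htw_pre a ha, rfl⟩)
        rw [pvLook_append]
        simp [hxtw, pvLook]
      · have hx' : ¬ el = x := fun e => hx e.symm
        rw [if_neg hx, ← hlk x, ← hpredecomp, List.append_assoc, pvLook_append, pvLook_append]
        by_cases h1x : x ∈ tw.map Prod.fst
        · simp [h1x]
        · rw [if_neg h1x, if_neg h1x,
            show pvLook ((el, f + 1) :: (dw ++ suf)) x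
              = if el = x then f + 1 else pvLook (dw ++ suf) x from rfl,
            if_neg hx', pvLook_append, pvLook_append,
            show pvLook ((el, f) :: suf) x = if el = x then f else pvLook suf x from rfl,
            if_neg hx']
  · -- fresh element: append (el, 1)
    have hstep := pvStepA_not_mem nf el hs h1 hmem
    have hc : st.1.getD el 0 + 1 = 1 := by rw [← hlk el, pvLook_zero nf el hmem]; norm_num
    rw [hstep]
    obtain ⟨n0, nf', rfl⟩ : ∃ n0 nf', nf = n0 :: nf' := by
      cases nf with
      | nil => exact absurd rfl hne
      | cons a b => exact ⟨a, b, rfl⟩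
    have hb : st.2 = n0 := by simpa using hhd.symm
    have hn0 : 1 ≤ n0.2 := h1 n0 (by simp)
    refine ⟨⟨?_, ?_, ?_⟩, by simp, ?_, ?_⟩
    · rw [List.pairwise_append]
      exact ⟨hs, by simp, fun a ha b hb' => by
        have := h1 a ha; simp at hb'; rw [hb']; simpa using this⟩
    · simp only [List.map_append, List.map_cons, List.map_nil]
      rw [List.nodup_append]
      refine ⟨hnd, by simp, fun a ha b hbm => ?_⟩
      have hb' : b = el := by simpa using hbm
      subst hb'
      exact fun hab => hmem (hab ▸ ha)
    · intro p hp
      rcases List.mem_append.mp hp with hp | hp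
      · exact h1 p hp
      · have hp1 : p = (el, 1) := by simpa using hp
        simp [hp1]
    · show _ = (pvStepB st el).2
      have hstB : (pvStepB st el).2
          = if st.1.getD el 0 + 1 > st.2.2 then (el, st.1.getD el 0 + 1) else st.2 := by
        simp only [pvStepB]
      have hno : ¬ (st.1.getD el 0 + 1 > st.2.2) := by rw [hc, hb]; omega
      rw [hstB, if_neg hno, hb]
      rfl
    · intro x
      show _ = ((st.1.insert el (st.1.getD el 0 + 1)).getD x 0)
      rw [PySem.Dict.getD_insert, hc, pvLook_append]
      by_cases hx : x = el
      · subst hx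
        rw [if_neg hmem]
        simp [pvLook]
      · rw [if_neg hx, ← hlk x]
        by_cases hxk : x ∈ (n0 :: nf').map Prod.fst
        · rw [if_pos hxk]
        · rw [if_neg hxk, pvLook_zero _ x hxk,
            show pvLook [(el, 1)] x = if el = x then (1 : Int) else pvLook [] x from rfl,
            if_neg (fun e : el = x => hx e.symm)]
          rfl

lemma pvRel_fold (l : List Int) :
    ∀ nf st, pvRel nf st → pvRel (l.foldl pvStepA nf) (l.foldl pvStepB st) := by
  induction l with
  | nil => intro nf st h; exact h
  | cons a l ih => intro nf st h; exact ih _ _ (pvRel_step nf st a h)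

lemma pvRel_init (a0 : Int) :
    pvRel [(a0, 1)] (pvStepB (PySem.Dict.empty, (a0, 0)) a0) := by
  have hc : (PySem.Dict.empty : PySem.Dict Int Int).getD a0 0 + 1 = 1 := by
    rw [PySem.Dict.getD_empty]; norm_num
  refine ⟨⟨by simp, by simp, by simp⟩, by simp, ?_, ?_⟩
  · simp [pvStepB]
  · intro x
    simp only [pvStepB, hc]
    rw [PySem.Dict.getD_insert, PySem.Dict.getD_empty]
    by_cases hx : x = a0
    · simp [hx, pvLook]
    · have hx' : ¬ a0 = x := fun e => hx e.symm
      simp [hx, hx', pvLook]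

-- ===== VERDICT (by name: the statement is the Claim_ definition above) =====
theorem find_most_frequent_number2_spec : Claim_equal_find_most_frequent_number2 := by
  intro arr _ hpre
  unfold Spec_find_most_frequent_number2
  cases arr with
  | nil => exact absurd rfl hpre
  | cons a0 rest =>
    obtain ⟨_, hne, hhd, _⟩ := pvRel_fold rest _ _ (pvRel_init a0)
    have hA : find_most_frequent_number2 (a0 :: rest)
        = match List.foldl pvStepA [(a0, 1)] rest with
          | [] => ((0 : Int), (0 : Int))
          | p :: _ => p := rfl
    have hB : find_most_frequent_number2_alt (a0 :: rest)
        = (List.foldl pvStepB (pvStepB (PySem.Dict.empty, (a0, 0)) a0) rest).2 := rfl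
    rw [hA, hB]
    cases hnf : List.foldl pvStepA [(a0, 1)] rest with
    | nil => exact absurd hnf hne
    | cons p tail =>
      rw [hnf] at hhd
      simp only [List.headD_cons] at hhd
      exact hhd
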